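-- pv_equiv track=rewrite | github.com/oskarkraak/Advent-of-Code | year2022/day11/Solution.py | get_monkey_business
-- ===== SOURCE A (Python) =====
-- def get_monkey_business(monkey_activity):
--     max_two = [0, 0]
--     for i in monkey_activity:
--         if i > max_two[0]:
--             max_two[0] = i
--         if max_two[0] > max_two[1]:
--             temp = max_two[1]
--             max_two[1] = max_two[0]
--             max_two[0] = temp
--     return max_two[0] * max_two[1]
-- ===== SOURCE B (Python) =====
-- def get_monkey_business(monkey_activity):
--     s = sorted(list(monkey_activity) + [0, 0], reverse=True)
--     return s[0] * s[1]
-- ===== Notes on version B (the rewrite author's own statement) =====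
-- stated objective: simpler
-- what changed: Replaces the linear scan maintaining two running maxima (with manual swap) by sorting a fresh copy of the list with two zero sentinels descending and multiplying its first two elements.
import Mathlib
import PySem

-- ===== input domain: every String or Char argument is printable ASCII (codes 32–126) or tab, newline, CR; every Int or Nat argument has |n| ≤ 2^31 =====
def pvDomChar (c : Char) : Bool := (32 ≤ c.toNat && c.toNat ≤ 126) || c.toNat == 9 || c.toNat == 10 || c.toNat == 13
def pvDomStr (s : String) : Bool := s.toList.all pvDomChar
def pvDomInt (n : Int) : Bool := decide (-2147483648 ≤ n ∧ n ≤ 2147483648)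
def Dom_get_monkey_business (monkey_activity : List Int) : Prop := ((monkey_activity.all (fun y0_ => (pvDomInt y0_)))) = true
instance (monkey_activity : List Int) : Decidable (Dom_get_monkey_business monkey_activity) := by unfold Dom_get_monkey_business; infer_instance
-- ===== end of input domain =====

-- B replaces A's two-running-maxima scan by sorting a copy (with two zero sentinels) descending
-- and multiplying the first two elements: simpler, same values everywhere.

-- ===== PORT A =====
-- literal port of A's loop: state = (max_two[0], max_two[1])
def get_monkey_business (monkey_activity : List Int) : Int :=
  let max_two := monkey_activity.foldl
    (fun mt i =>
      let mt0 := if i > mt.1 then i else mt.1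
      if mt0 > mt.2 then (mt.2, mt0) else (mt0, mt.2))
    ((0 : Int), (0 : Int))
  max_two.1 * max_two.2

-- ===== PORT B =====
-- s always has length ≥ 2, so Python's s[0], s[1] never raise; pyGetD with default 0 is exact here
def get_monkey_business_alt (monkey_activity : List Int) : Int :=
  let s := PySem.List.sorted (monkey_activity ++ [0, 0]) (fun x => x) true
  PySem.List.pyGetD s 0 0 * PySem.List.pyGetD s 1 0

-- ===== PRECONDITION & SPEC =====
def Spec_get_monkey_business (monkey_activity : List Int) (out : Int) : Prop := out = get_monkey_business_alt monkey_activity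
instance (monkey_activity : List Int) (out : Int) : Decidable (Spec_get_monkey_business monkey_activity out) := by unfold Spec_get_monkey_business; infer_instance

-- ===== CLAIM (what is proved, stated in full; the proofs are below) =====
def Claim_equal_get_monkey_business : Prop := ∀ (monkey_activity : List Int), Dom_get_monkey_business monkey_activity → Spec_get_monkey_business monkey_activity (get_monkey_business monkey_activity)

-- ===== LEMMAS AND PROOFS =====

-- A's loop step on the state pair
def pvStep (mt : Int × Int) (i : Int) : Int × Int :=
  let mt0 := if i > mt.1 then i else mt.1
  if mt0 > mt.2 then (mt.2, mt0) else (mt0, mt.2)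

-- descending insertion (the insertBy instance that sorted … (fun x => x) true unfolds to)
def pvIns (v : Int) (acc : List Int) : List Int :=
  PySem.List.insertBy (fun a b => decide (b < a)) v acc

lemma pvIns_nil (v : Int) : pvIns v [] = [v] := rfl

lemma pvIns_cons_pos (v c : Int) (cs : List Int) (h : c < v) : pvIns v (c::cs) = v::c::cs := by
  simp [pvIns, PySem.List.insertBy, h]

lemma pvIns_cons_neg (v c : Int) (cs : List Int) (h : ¬ c < v) : pvIns v (c::cs) = c :: pvIns v cs := by
  simp [pvIns, PySem.List.insertBy, h]

lemma pvIns_pairwise (v : Int) (acc : List Int)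
    (h : acc.Pairwise (fun a b => b ≤ a)) :
    (pvIns v acc).Pairwise (fun a b => b ≤ a) := by
  induction acc with
  | nil => simp [pvIns_nil]
  | cons c cs ih =>
    rcases List.pairwise_cons.mp h with ⟨hc, hcs⟩
    by_cases hlt : c < v
    · rw [pvIns_cons_pos v c cs hlt]
      refine List.pairwise_cons.mpr ⟨?_, h⟩
      intro b hb
      rcases List.mem_cons.mp hb with rfl | hb'
      · omega
      · have := hc b hb'; omega
    · rw [pvIns_cons_neg v c cs hlt]
      refine List.pairwise_cons.mpr ⟨?_, ih hcs⟩
      intro b hb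
      have hmem : b = v ∨ b ∈ cs := by
        have := (PySem.List.mem_insertBy (before := fun a b => decide (b < a)) (x := v) (ys := cs) (y := b))
        simpa [pvIns] using this.mp (by simpa [pvIns] using hb)
      rcases hmem with rfl | hb'
      · omega
      · exact hc b hb'

lemma pvIns_comm (a b : Int) (acc : List Int)
    (h : acc.Pairwise (fun x y => y ≤ x)) :
    pvIns a (pvIns b acc) = pvIns b (pvIns a acc) := by
  induction acc with
  | nil =>
    rw [pvIns_nil, pvIns_nil]
    rcases lt_trichotomy a b with h1 | rfl | h1
    · rw [pvIns_cons_neg a b [] (by omega), pvIns_cons_pos b a [] h1, pvIns_nil]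
    · rfl
    · rw [pvIns_cons_pos a b [] h1, pvIns_cons_neg b a [] (by omega), pvIns_nil]
  | cons c cs ih =>
    have hcs := (List.pairwise_cons.mp h).2
    by_cases hcb : c < b <;> by_cases hca : c < a
    · rw [pvIns_cons_pos _ _ _ hcb, pvIns_cons_pos _ _ _ hca]
      rcases lt_trichotomy a b with h1 | rfl | h1
      · rw [pvIns_cons_neg _ _ _ (show ¬ b < a by omega), pvIns_cons_pos _ _ _ hca,
          pvIns_cons_pos _ _ _ h1]
      · rfl
      · rw [pvIns_cons_pos _ _ _ h1, pvIns_cons_neg _ _ _ (show ¬ a < b by omega),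
          pvIns_cons_pos _ _ _ hcb]
    · rw [pvIns_cons_pos _ _ _ hcb, pvIns_cons_neg _ _ _ (show ¬ b < a by omega),
        pvIns_cons_neg _ _ _ hca, pvIns_cons_pos _ _ _ hcb]
    · rw [pvIns_cons_neg _ _ _ hcb, pvIns_cons_pos _ _ _ hca, pvIns_cons_pos _ _ _ hca,
        pvIns_cons_neg _ _ _ (show ¬ a < b by omega), pvIns_cons_neg _ _ _ hcb]
    · rw [pvIns_cons_neg _ _ _ hcb, pvIns_cons_neg _ _ _ hca,
        pvIns_cons_neg _ _ _ hca, pvIns_cons_neg _ _ _ hcb, ih hcs]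

-- zero-pad: insert the two sentinel zeros
def pvZ (acc : List Int) : List Int := pvIns 0 (pvIns 0 acc)

lemma pvZ_pairwise (acc : List Int) (h : acc.Pairwise (fun a b => b ≤ a)) :
    (pvZ acc).Pairwise (fun a b => b ≤ a) :=
  pvIns_pairwise _ _ (pvIns_pairwise _ _ h)

lemma pvZ_ins (i : Int) (acc : List Int) (h : acc.Pairwise (fun a b => b ≤ a)) :
    pvZ (pvIns i acc) = pvIns i (pvZ acc) := by
  unfold pvZ
  rw [pvIns_comm 0 i acc h, pvIns_comm 0 i (pvIns 0 acc) (pvIns_pairwise _ _ h)]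

-- key step: inserting i into the padded sorted list moves its first two elements by A's step
lemma pvStep_head (i x y : Int) (t : List Int)
    (hyx : y ≤ x) :
    pvIns i (x :: y :: t) =
      (pvStep (y, x) i).2 :: (pvStep (y, x) i).1 ::
        (if y < i then y :: t else pvIns i t) := by
  simp only [pvStep]
  by_cases h1 : x < i
  · rw [pvIns_cons_pos _ _ _ h1]
    simp [show i > y by omega, show i > x from h1]
  · rw [pvIns_cons_neg _ _ _ h1]
    by_cases h2 : y < i
    · rw [pvIns_cons_pos _ _ _ h2]
      simp [show i > y from h2, show ¬ i > x by omega]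
    · rw [pvIns_cons_neg _ _ _ h2]
      simp [show ¬ i > y by omega, show ¬ y > x by omega]

-- main invariant
lemma pv_main (l : List Int) : ∀ (acc : List Int) (x y : Int) (t : List Int),
    acc.Pairwise (fun a b => b ≤ a) →
    pvZ acc = x :: y :: t →
    ∃ t', pvZ (l.foldl (fun a v => pvIns v a) acc) =
      (l.foldl pvStep (y, x)).2 :: (l.foldl pvStep (y, x)).1 :: t' := by
  induction l with
  | nil =>
    intro acc x y t h hz
    exact ⟨t, by simpa using hz⟩
  | cons i l ih =>
    intro acc x y t h hz
    have hx : pvZ (pvIns i acc) = pvIns i (x :: y :: t) := by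
      rw [pvZ_ins i acc h, hz]
    have hyx : y ≤ x := by
      have hp := pvZ_pairwise acc h
      rw [hz] at hp
      exact (List.pairwise_cons.mp hp).1 y (by simp)
    rw [pvStep_head i x y t hyx] at hx
    simp only [List.foldl_cons]
    exact ih (pvIns i acc) _ _ _ (pvIns_pairwise _ _ h) hx

lemma pvZ_nil : pvZ [] = [0, 0] := by decide

-- ===== VERDICT (by name: the statement is the Claim_ definition above) =====
theorem get_monkey_business_spec : Claim_equal_get_monkey_business := by
  intro l _
  unfold Spec_get_monkey_business get_monkey_business get_monkey_business_alt
  have hs : PySem.List.sorted (l ++ [0, 0]) (fun x => x) true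
      = pvZ (l.foldl (fun a v => pvIns v a) []) := by
    rw [PySem.List.sorted_rev_eq_foldl_insertBy]
    rw [List.foldl_append]
    rfl
  obtain ⟨t', ht'⟩ := pv_main l [] 0 0 [] (by simp) pvZ_nil
  rw [hs, ht']
  have hfold : l.foldl
      (fun mt i =>
        let mt0 := if i > mt.1 then i else mt.1
        if mt0 > mt.2 then (mt.2, mt0) else (mt0, mt.2))
      ((0 : Int), (0 : Int)) = l.foldl pvStep (0, 0) := rfl
  simp only [hfold, PySem.List.pyGetD_ofNat', List.getD]
  simp [mul_comm]
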